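-- pv_equiv track=rewrite | github.com/tdw419/geometry_os | systems/spatial_coordinator/apps/terminal_app.py | _parse_csi_params
-- ===== SOURCE A (Python) =====
-- from typing import Optional, Tuple, List
--
-- def _parse_csi_params(param_bytes: List[int]) -> List[int]:
--     """Parse CSI parameters."""
--     if not param_bytes:
--         return []
--
--     params = []
--     current = 0
--     has_value = False
--
--     for b in param_bytes:
--         if 0x30 <= b <= 0x39:  # Digit
--             current = current * 10 + (b - 0x30)
--             has_value = True
--         elif b == 0x3B:  # Semicolon separator
--             params.append(current if has_value else 0)
--             current = 0
--             has_value = False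
--
--     if has_value:
--         params.append(current)
--
--     return params
-- ===== SOURCE B (Python) =====
-- def _segment_value(seg):
--     """Decimal value of a list of ASCII digit bytes (empty list -> 0)."""
--     value = 0
--     for b in seg:
--         value = value * 10 + (b - 0x30)
--     return value
--
--
-- def _parse_csi_params(param_bytes):
--     """Parse CSI parameters: gather the ';'-separated digit segments, then decode each."""
--     segments = []   # completed segments (lists of digit bytes)
--     seg = []        # segment currently being built
--     for b in param_bytes:
--         if 0x30 <= b <= 0x39:
--             seg.append(b)
--         elif b == 0x3B:
--             segments.append(seg)
--             seg = []
--     params = [_segment_value(s) for s in segments]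
--     if seg:
--         params.append(_segment_value(seg))
--     return params
-- ===== Notes on version B (the rewrite author's own statement) =====
-- stated objective: alternative
-- what changed: Replaces A's online Horner accumulator with its current/has_value flags by a two-stage decomposition: one pass collects the ';'-separated digit-byte segments as lists, then a comprehension decodes each completed segment (an empty segment decodes to 0, so no flag is needed) and the trailing segment is decoded only if non-empty.
import Mathlib
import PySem

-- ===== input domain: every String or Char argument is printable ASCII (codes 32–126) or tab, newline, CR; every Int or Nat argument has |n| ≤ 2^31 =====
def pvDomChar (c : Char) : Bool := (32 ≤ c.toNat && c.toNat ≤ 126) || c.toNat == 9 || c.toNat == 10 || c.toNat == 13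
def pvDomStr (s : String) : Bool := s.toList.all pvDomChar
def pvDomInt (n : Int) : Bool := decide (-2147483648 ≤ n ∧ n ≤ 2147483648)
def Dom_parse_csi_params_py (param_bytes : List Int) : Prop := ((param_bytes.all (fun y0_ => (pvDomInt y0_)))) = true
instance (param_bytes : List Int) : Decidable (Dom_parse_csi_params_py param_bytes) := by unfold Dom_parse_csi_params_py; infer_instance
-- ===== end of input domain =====

-- B replaces A's online accumulator (current/has_value) by a two-stage decomposition:
-- collect the ';'-separated digit-byte segments, then decode each (objective: alternative, same cost).

-- ===== PORT A =====
-- A's loop: state is (params, current, has_value)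
def pvStepA (st : List Int × Int × Bool) (b : Int) : List Int × Int × Bool :=
  if 0x30 ≤ b ∧ b ≤ 0x39 then (st.1, st.2.1 * 10 + (b - 0x30), true)
  else if b = 0x3B then (st.1 ++ [if st.2.2 then st.2.1 else 0], 0, false)
  else st

def parse_csi_params_py (param_bytes : List Int) : List Int :=
  if param_bytes = [] then []
  else
    let st := param_bytes.foldl pvStepA ([], 0, false)
    if st.2.2 then st.1 ++ [st.2.1] else st.1

-- ===== PORT B =====
-- _segment_value: decimal value of a list of digit bytes (empty -> 0)
def pvSegValue (seg : List Int) : Int := seg.foldl (fun v b => v * 10 + (b - 0x30)) 0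

-- Source B's for-loop over param_bytes, carrying (segments, seg)
def pvGather : List Int → List (List Int) × List Int → List (List Int) × List Int
  | [], st => st
  | b :: rest, st =>
      if 0x30 ≤ b ∧ b ≤ 0x39 then pvGather rest (st.1, st.2 ++ [b])
      else if b = 0x3B then pvGather rest (st.1 ++ [st.2], [])
      else pvGather rest st

def parse_csi_params_py_alt (param_bytes : List Int) : List Int :=
  let st := pvGather param_bytes ([], [])
  st.1.map pvSegValue ++ (if st.2 ≠ [] then [pvSegValue st.2] else [])

-- ===== PRECONDITION & SPEC =====
def Spec_parse_csi_params_py (param_bytes : List Int) (out : List Int) : Prop := out = parse_csi_params_py_alt param_bytes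
instance (param_bytes : List Int) (out : List Int) : Decidable (Spec_parse_csi_params_py param_bytes out) := by unfold Spec_parse_csi_params_py; infer_instance

-- ===== CLAIM (what is proved, stated in full; the proofs are below) =====
def Claim_equal_parse_csi_params_py : Prop := ∀ (param_bytes : List Int), Dom_parse_csi_params_py param_bytes → Spec_parse_csi_params_py param_bytes (parse_csi_params_py param_bytes)

-- ===== LEMMAS AND PROOFS =====

-- invariant: A's fold state is the decoded image of B's gathering state
theorem pvInv (bs : List Int) (segs : List (List Int)) (seg : List Int) :
    bs.foldl pvStepA (segs.map pvSegValue, pvSegValue seg, !seg.isEmpty)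
      = ((pvGather bs (segs, seg)).1.map pvSegValue,
         pvSegValue (pvGather bs (segs, seg)).2,
         !(pvGather bs (segs, seg)).2.isEmpty) := by
  induction bs generalizing segs seg with
  | nil => rfl
  | cons b rest ih =>
    by_cases hd : 0x30 ≤ b ∧ b ≤ 0x39
    · have hstep : pvStepA (segs.map pvSegValue, pvSegValue seg, !seg.isEmpty) b
          = (segs.map pvSegValue, pvSegValue seg * 10 + (b - 0x30), true) := by
        simp [pvStepA, hd]
      have hval : pvSegValue (seg ++ [b]) = pvSegValue seg * 10 + (b - 0x30) := by
        simp [pvSegValue, List.foldl_append]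
      have hne : (seg ++ [b]).isEmpty = false := by simp
      rw [List.foldl_cons, hstep, pvGather, if_pos hd]
      rw [show (true : Bool) = !(seg ++ [b]).isEmpty by rw [hne]; rfl, ← hval]
      exact ih segs (seg ++ [b])
    · by_cases hs : b = 0x3B
      · have hstep : pvStepA (segs.map pvSegValue, pvSegValue seg, !seg.isEmpty) b
            = (segs.map pvSegValue ++ [if !seg.isEmpty then pvSegValue seg else 0], 0, false) := by
          simp [pvStepA, hs]
        have happ : (if !seg.isEmpty then pvSegValue seg else 0) = pvSegValue seg := by
          cases hE : seg.isEmpty with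
          | true => simp [List.isEmpty_iff.mp hE, pvSegValue]
          | false => simp
        rw [List.foldl_cons, hstep, happ, pvGather, if_neg hd, if_pos hs]
        have h0 : (0 : Int) = pvSegValue [] := rfl
        have hmap : segs.map pvSegValue ++ [pvSegValue seg] = (segs ++ [seg]).map pvSegValue := by
          simp
        rw [h0, hmap, show (false : Bool) = !([] : List Int).isEmpty from rfl]
        exact ih (segs ++ [seg]) []
      · rw [List.foldl_cons, pvGather, if_neg hd, if_neg hs,
          show pvStepA (segs.map pvSegValue, pvSegValue seg, !seg.isEmpty) b
            = (segs.map pvSegValue, pvSegValue seg, !seg.isEmpty) by simp [pvStepA, hd, hs]]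
        exact ih segs seg

-- ===== VERDICT (by name: the statement is the Claim_ definition above) =====
theorem parse_csi_params_py_spec : Claim_equal_parse_csi_params_py := by
  intro xs _
  unfold Spec_parse_csi_params_py parse_csi_params_py parse_csi_params_py_alt
  by_cases hx : xs = []
  · subst hx; rfl
  · rw [if_neg hx]
    have h := pvInv xs [] []
    simp only [List.map_nil, pvSegValue, List.foldl_nil, List.isEmpty_nil, Bool.not_true] at h
    rw [h]
    cases hE : (pvGather xs ([], [])).2.isEmpty with
    | true => simp [List.isEmpty_iff.mp hE]
    | false =>
      have : (pvGather xs ([], [])).2 ≠ [] := by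
        intro hc; rw [hc] at hE; simp at hE
      simp [this, pvSegValue]
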